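-- pv_equiv track=rewrite | github.com/MarcoAruta/VITAMINbridge | vitamin_model_checker/model_checker_interface/explicit/NatATL/Recall/witnessParser.py | _split_groups_by_star
-- ===== SOURCE A (Python) =====
-- def _split_groups_by_star(pattern):
--     # Function to divide pattern in groups separated by '*' or '.'
--     groups = []
--     buffer = []
--     for char in pattern:
--         if char == '*' or char == '.':
--             if char == '*':
--                 if buffer:
--                     # Adds the current group to the final until *
--                     groups.append(''.join(buffer) + '*')
--                     buffer = []
--             else:
--                 if buffer:
--                     # Does the same but removing "." as we add it in another function
--                     groups.append(''.join(buffer) + '')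
--                     buffer = []
--         else:
--             # Adds the current character to the buffer
--             buffer.append(char)
--     if buffer:
--         # Adds the last group to the final group
--         groups.append(''.join(buffer))
--     return groups
-- ===== SOURCE B (Python) =====
-- import re
--
-- def _split_groups_by_star(pattern):
--     # One regex pass: maximal runs of non-delimiter chars, with a '*' suffix
--     # attached exactly when the run is immediately followed by a star.
--     return re.findall(r'[^*.]+\*?', pattern)
-- ===== Notes on version B (the rewrite author's own statement) =====
-- stated objective: idiomatic
-- what changed: Replaced the explicit buffer-accumulating character loop with a single re.findall regex matching maximal non-delimiter runs with an optional adjacent star suffix.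
import Mathlib
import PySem

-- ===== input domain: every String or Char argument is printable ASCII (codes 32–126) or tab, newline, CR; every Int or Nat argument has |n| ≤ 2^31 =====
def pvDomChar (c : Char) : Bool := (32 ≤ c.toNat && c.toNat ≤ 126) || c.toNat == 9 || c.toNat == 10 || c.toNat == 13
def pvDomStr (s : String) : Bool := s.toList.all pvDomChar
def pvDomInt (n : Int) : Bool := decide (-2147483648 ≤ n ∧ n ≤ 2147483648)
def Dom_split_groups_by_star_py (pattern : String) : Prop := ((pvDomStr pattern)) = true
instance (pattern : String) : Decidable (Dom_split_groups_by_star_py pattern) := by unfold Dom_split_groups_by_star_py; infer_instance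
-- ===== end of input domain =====

-- B replaces A's buffer-accumulating character loop with a single regex-style scan
-- (maximal non-delimiter runs with an optional adjacent '*' suffix); objective: idiomatic.


-- ===== PORT A =====
-- one step of A's for-loop, state = (groups, buffer)
def pvAStep (st : List String × List Char) (c : Char) : List String × List Char :=
  let (groups, buffer) := st
  if c = '*' ∨ c = '.' then
    if c = '*' then
      if buffer ≠ [] then (groups ++ [String.ofList buffer ++ "*"], []) else (groups, buffer)
    else
      if buffer ≠ [] then (groups ++ [String.ofList buffer ++ ""], []) else (groups, buffer)
  else
    (groups, buffer ++ [c])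

def split_groups_by_star_py (pattern : String) : List String :=
  let st := pattern.toList.foldl pvAStep ([], [])
  if st.2 ≠ [] then st.1 ++ [String.ofList st.2] else st.1

-- ===== PORT B =====
-- literal port of re.findall(r'[^*.]+\*?', pattern): skip delimiters, match a
-- maximal non-delimiter run, optionally consume one immediately following '*'.
def pvNonDelim (c : Char) : Bool := !(c = '*' || c = '.')

def pvScan : List Char → List String
  | [] => []
  | c :: rest =>
    if hc : pvNonDelim c then
      let run := List.takeWhile pvNonDelim (c :: rest)
      match h : List.dropWhile pvNonDelim (c :: rest) with
      | '*' :: rest'' => (String.ofList run ++ "*") :: pvScan rest''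
      | rest' => String.ofList run :: pvScan rest'
    else
      pvScan rest
termination_by l => l.length
decreasing_by
  · have h1 := List.length_dropWhile_le (p := pvNonDelim) rest
    rw [List.dropWhile_cons, if_pos hc] at h
    have h2 := congrArg List.length h
    simp at h2 ⊢; omega
  · have h1 := List.length_dropWhile_le (p := pvNonDelim) rest
    rw [List.dropWhile_cons, if_pos hc] at h
    have h2 := congrArg List.length h
    simp at h2 ⊢; omega
  · simp

def split_groups_by_star_py_alt (pattern : String) : List String :=
  pvScan pattern.toList

-- ===== PRECONDITION & SPEC =====
def Spec_split_groups_by_star_py (pattern : String) (out : List String) : Prop := out = split_groups_by_star_py_alt pattern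
instance (pattern : String) (out : List String) : Decidable (Spec_split_groups_by_star_py pattern out) := by unfold Spec_split_groups_by_star_py; infer_instance

-- ===== CLAIM (what is proved, stated in full; the proofs are below) =====
def Claim_equal_split_groups_by_star_py : Prop := ∀ (pattern : String), Dom_split_groups_by_star_py pattern → Spec_split_groups_by_star_py pattern (split_groups_by_star_py pattern)

-- ===== LEMMAS AND PROOFS =====

-- flush A's final state
def pvFinish (st : List String × List Char) : List String :=
  if st.2 ≠ [] then st.1 ++ [String.ofList st.2] else st.1

-- the head of a nonempty dropWhile result fails the predicate
theorem pv_dropWhile_head_false (p : Char → Bool) (l : List Char) (d : Char) (r : List Char)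
    (h : List.dropWhile p l = d :: r) : p d = false := by
  induction l with
  | nil => simp [List.dropWhile] at h
  | cons c cs ih =>
    rw [List.dropWhile_cons] at h
    split at h
    · exact ih h
    · next hp => cases h; simpa using hp

-- unfolding lemmas for pvScan (it is defined by well-founded recursion)
theorem pvScan_delim (c : Char) (rest : List Char) (h : pvNonDelim c = false) :
    pvScan (c :: rest) = pvScan rest := by
  rw [pvScan.eq_def]; simp [h]

theorem pvScan_star (c : Char) (rest rest'' : List Char) (hc : pvNonDelim c = true)
    (hr : List.dropWhile pvNonDelim (c :: rest) = '*' :: rest'') :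
    pvScan (c :: rest) = (String.ofList (List.takeWhile pvNonDelim (c :: rest)) ++ "*") :: pvScan rest'' := by
  rw [pvScan.eq_def]
  simp only [hc, reduceDIte]
  split
  · next x heq => rw [hr] at heq; cases heq; rfl
  · next heq => rw [hr] at heq; exact absurd rfl (heq rest'')

theorem pvScan_nostar (c : Char) (rest rest' : List Char) (hc : pvNonDelim c = true)
    (hr : List.dropWhile pvNonDelim (c :: rest) = rest') (hns : ∀ t, rest' ≠ '*' :: t) :
    pvScan (c :: rest) = String.ofList (List.takeWhile pvNonDelim (c :: rest)) :: pvScan rest' := by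
  rw [pvScan.eq_def]
  simp only [hc, reduceDIte]
  split
  · next x heq => rw [hr] at heq; exact absurd heq (hns x)
  · next heq => rw [hr]

-- consuming a run of non-delimiter chars just extends A's buffer
theorem pvA_run (run : List Char) (hrun : ∀ c ∈ run, pvNonDelim c = true) :
    ∀ (rest : List Char) (gs : List String) (buf : List Char),
    (run ++ rest).foldl pvAStep (gs, buf) = rest.foldl pvAStep (gs, buf ++ run) := by
  induction run with
  | nil => intro rest gs buf; simp
  | cons c cs ih =>
    intro rest gs buf
    have hc : pvNonDelim c = true := hrun c (by simp)
    have hcs : ∀ x ∈ cs, pvNonDelim x = true := fun x hx => hrun x (by simp [hx])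
    have hstep : pvAStep (gs, buf) c = (gs, buf ++ [c]) := by
      simp [pvNonDelim] at hc
      simp [pvAStep, hc.1, hc.2]
    simp only [List.cons_append, List.foldl_cons, hstep]
    simpa using ih hcs rest gs (buf ++ [c])

-- main invariant: A's fold-and-flush from (gs, []) equals gs ++ B's scan
theorem pvA_eq_scan : ∀ (n : ℕ) (l : List Char) (gs : List String), l.length ≤ n →
    pvFinish (l.foldl pvAStep (gs, [])) = gs ++ pvScan l := by
  intro n
  induction n with
  | zero =>
    intro l gs hl
    have : l = [] := List.eq_nil_of_length_eq_zero (Nat.le_zero.mp hl)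
    subst this; simp [pvFinish, pvScan]
  | succ n ih =>
    intro l gs hl
    match l with
    | [] => simp [pvFinish, pvScan]
    | c :: rest =>
      by_cases hc : pvNonDelim c = true
      · -- non-delimiter head: decompose l = run ++ rest'
        have hdecomp : List.takeWhile pvNonDelim (c :: rest) ++ List.dropWhile pvNonDelim (c :: rest) = c :: rest :=
          List.takeWhile_append_dropWhile
        have hrunmem : ∀ x ∈ List.takeWhile pvNonDelim (c :: rest), pvNonDelim x = true :=
          fun x hx => List.mem_takeWhile_imp hx
        have hrunne : List.takeWhile pvNonDelim (c :: rest) ≠ [] := by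
          simp [List.takeWhile, hc]
        have hfold : (c :: rest).foldl pvAStep (gs, ([] : List Char)) =
            (List.dropWhile pvNonDelim (c :: rest)).foldl pvAStep (gs, List.takeWhile pvNonDelim (c :: rest)) := by
          have hthis := pvA_run _ hrunmem (List.dropWhile pvNonDelim (c :: rest)) gs []
          rw [hdecomp] at hthis
          simpa using hthis
        have hlen' : (List.dropWhile pvNonDelim (c :: rest)).length ≤ rest.length := by
          simpa [List.dropWhile, hc] using List.length_dropWhile_le (p := pvNonDelim) rest
        cases hr : List.dropWhile pvNonDelim (c :: rest) with
        | nil =>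
          rw [hfold, hr]
          rw [pvScan_nostar c rest [] hc hr (by intro t h; cases h)]
          simp [pvFinish, hrunne, pvScan]
        | cons d rest'' =>
          have hd : pvNonDelim d = false := pv_dropWhile_head_false _ _ _ _ hr
          have hl' : rest.length + 1 ≤ n + 1 := by simpa using hl
          have hlen'' : rest''.length ≤ n := by
            rw [hr] at hlen'; simp at hlen'; omega
          have hdelim : d = '*' ∨ d = '.' := by
            simp [pvNonDelim] at hd; tauto
          rcases hdelim with hstar | hdot
        -- star: A emits run ++ "*" and resets; B attaches the '*' suffix
          · subst hstar
            have hstep : pvAStep (gs, List.takeWhile pvNonDelim (c :: rest)) '*' =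
                (gs ++ [String.ofList (List.takeWhile pvNonDelim (c :: rest)) ++ "*"], []) := by
              simp [pvAStep, hrunne]
            rw [hfold, hr]
            simp only [List.foldl_cons, hstep]
            rw [ih rest'' _ hlen'']
            rw [pvScan_star c rest rest'' hc hr]
            simp
          · subst hdot
            have hstep : pvAStep (gs, List.takeWhile pvNonDelim (c :: rest)) '.' =
                (gs ++ [String.ofList (List.takeWhile pvNonDelim (c :: rest)) ++ ""], []) := by
              simp [pvAStep, hrunne]
            rw [hfold, hr]
            simp only [List.foldl_cons, hstep]
            rw [ih rest'' _ hlen'']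
            -- B: default branch on rest' = '.' :: rest'', then scan skips the '.'
            rw [pvScan_nostar c rest ('.' :: rest'') hc hr (by intro t h; cases h)]
            rw [pvScan_delim '.' rest'' (by decide)]
            simp
      · -- delimiter head with empty buffer: both sides skip it
        have hc' : c = '*' ∨ c = '.' := by simp [pvNonDelim] at hc; tauto
        have hstep : pvAStep (gs, ([] : List Char)) c = (gs, []) := by
          rcases hc' with h | h <;> simp [pvAStep, h]
        have hlen : rest.length ≤ n := by simpa using Nat.le_of_succ_le_succ hl
        have hscan : pvScan (c :: rest) = pvScan rest := pvScan_delim c rest (by simpa using hc)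
        simp only [List.foldl_cons, hstep, hscan]
        exact ih rest gs hlen

-- ===== VERDICT (by name: the statement is the Claim_ definition above) =====
theorem split_groups_by_star_py_spec : Claim_equal_split_groups_by_star_py := by
  intro pattern _
  unfold Spec_split_groups_by_star_py split_groups_by_star_py split_groups_by_star_py_alt
  simpa [pvFinish] using pvA_eq_scan pattern.toList.length pattern.toList [] le_rfl
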